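-- pv_equiv track=rewrite | github.com/Deepak-Laksman/DSA-Implementations-Python | Recursion/striver_recursion_problems/combination_sum_2.py | combinations2
-- ===== SOURCE A (Python) =====
-- def combinations2(arr, target):
--     n = len(arr)
--     ans = []
--     def recur(idx, tar, ds):
--         if tar == 0:
--             ans.append(ds.copy())
--             return
--         if idx == n:
--             return
--         for i in range(idx, n):
--             if (i > idx) and (arr[i] == arr[i - 1]):
--                 continue
--             if arr[i] > tar:
--                 break
--             ds.append(arr[i])
--             recur(i + 1, tar - arr[i], ds)
--             ds.pop()
--     recur(0, target, [])
--     return ans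
-- ===== SOURCE B (Python) =====
-- def combinations2(arr, target):
--     n = len(arr)
--     ans = []
--     ds = []
--
--     def recur(idx, tar):
--         if tar == 0:
--             ans.append(ds.copy())
--             return
--         if idx == n:
--             return
--         if arr[idx] > tar:
--             return
--         # pick arr[idx]
--         ds.append(arr[idx])
--         recur(idx + 1, tar - arr[idx])
--         ds.pop()
--         # not-pick: skip the whole run of values equal to arr[idx]
--         nxt = idx + 1
--         while nxt < n and arr[nxt] == arr[idx]:
--             nxt += 1
--         recur(nxt, tar)
--
--     recur(0, target)
--     return ans
-- ===== Notes on version B (the rewrite author's own statement) =====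
-- stated objective: alternative
-- what changed: Replaced A's for-loop over all next choices (with continue-on-duplicate and break-on-overflow) by a binary pick/not-pick recursion whose not-pick branch jumps over the whole run of equal values.
import Mathlib
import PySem

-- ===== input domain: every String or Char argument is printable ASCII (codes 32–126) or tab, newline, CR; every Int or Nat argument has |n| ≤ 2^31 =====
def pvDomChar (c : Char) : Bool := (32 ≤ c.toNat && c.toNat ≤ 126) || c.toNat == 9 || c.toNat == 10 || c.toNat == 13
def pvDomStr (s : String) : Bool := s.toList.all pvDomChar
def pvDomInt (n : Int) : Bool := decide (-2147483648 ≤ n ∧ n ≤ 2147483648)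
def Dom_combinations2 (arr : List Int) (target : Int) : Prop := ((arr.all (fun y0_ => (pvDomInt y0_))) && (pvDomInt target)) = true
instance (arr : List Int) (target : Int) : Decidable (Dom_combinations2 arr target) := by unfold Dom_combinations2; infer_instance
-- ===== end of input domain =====

-- B rewrites A's for-loop backtracking as a binary pick/not-pick recursion (not faster, a different decomposition); return value only, neither mutates its arguments.

-- ===== PORT A =====
-- A's inner `recur`: `ans` is threaded as an accumulator, `ds` append/pop around the
-- recursive call becomes passing `ds ++ [x]` down; the for-loop with continue/break is `loopA`.
mutual
def recurA (arr : List Int) (n idx : Nat) (tar : Int) (ds : List Int) (ans : List (List Int)) : List (List Int) :=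
  if tar = 0 then ans ++ [ds]
  else if idx = n then ans
  else loopA arr n idx idx tar ds ans
  termination_by 2 * (n - idx) + 2

def loopA (arr : List Int) (n idx i : Nat) (tar : Int) (ds : List Int) (ans : List (List Int)) : List (List Int) :=
  if h : i < n then
    if idx < i ∧ arr.getD i 0 = arr.getD (i - 1) 0 then
      loopA arr n idx (i + 1) tar ds ans
    else if arr.getD i 0 > tar then ans
    else loopA arr n idx (i + 1) tar ds (recurA arr n (i + 1) (tar - arr.getD i 0) (ds ++ [arr.getD i 0]) ans)
  else ans
  termination_by 2 * (n - i) + 1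
  decreasing_by all_goals omega
end

def combinations2 (arr : List Int) (target : Int) : List (List Int) :=
  recurA arr arr.length 0 target [] []

-- ===== PORT B =====
-- B's while-loop advancing past the run of equal values.
def skipB (arr : List Int) (n : Nat) (v : Int) (j : Nat) : Nat :=
  if j < n ∧ arr.getD j 0 = v then skipB arr n v (j + 1) else j
  termination_by n - j
  decreasing_by omega

-- needed by recurB's termination proof
theorem skipB_ge (arr : List Int) (n : Nat) (v : Int) (j : Nat) : j ≤ skipB arr n v j := by
  induction j using skipB.induct arr n v with
  | case1 j h ih => rw [skipB, if_pos h]; omega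
  | case2 j h => rw [skipB, if_neg h]

-- B's `recur`, accumulator-threaded like A's. Python tests `idx == n`; since idx ≤ n always,
-- `n ≤ idx` is the same test, written so that the recursion is structurally total.
def recurB (arr : List Int) (n idx : Nat) (tar : Int) (ds : List Int) (ans : List (List Int)) : List (List Int) :=
  if tar = 0 then ans ++ [ds]
  else if n ≤ idx then ans
  else if arr.getD idx 0 > tar then ans
  else
    let ans1 := recurB arr n (idx + 1) (tar - arr.getD idx 0) (ds ++ [arr.getD idx 0]) ans
    recurB arr n (skipB arr n (arr.getD idx 0) (idx + 1)) tar ds ans1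
  termination_by n - idx
  decreasing_by
  · omega
  · have := skipB_ge arr n (arr.getD idx 0) (idx + 1); omega

def combinations2_alt (arr : List Int) (target : Int) : List (List Int) :=
  recurB arr arr.length 0 target [] []

-- ===== PRECONDITION & SPEC =====
def Spec_combinations2 (arr : List Int) (target : Int) (out : List (List Int)) : Prop := out = combinations2_alt arr target
instance (arr : List Int) (target : Int) (out : List (List Int)) : Decidable (Spec_combinations2 arr target out) := by unfold Spec_combinations2; infer_instance

-- ===== CLAIM (what is proved, stated in full; the proofs are below) =====
def Claim_equal_combinations2 : Prop := ∀ (arr : List Int) (target : Int), Dom_combinations2 arr target → Spec_combinations2 arr target (combinations2 arr target)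

-- ===== LEMMAS AND PROOFS =====

-- every position strictly before the skip result carries the value v
theorem skipB_mem (arr : List Int) (n : Nat) (v : Int) (j : Nat) :
    ∀ k, j ≤ k → k < skipB arr n v j → arr.getD k 0 = v := by
  induction j using skipB.induct arr n v with
  | case1 j h ih =>
    intro k hjk hk
    rcases Nat.eq_or_lt_of_le hjk with rfl | hlt
    · exact h.2
    · exact ih k hlt (by rwa [skipB, if_pos h] at hk)
  | case2 j h =>
    intro k hjk hk
    rw [skipB, if_neg h] at hk; omega

-- the skip result, if still in range, does not carry v
theorem skipB_end (arr : List Int) (n : Nat) (v : Int) (j : Nat) :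
    skipB arr n v j < n → arr.getD (skipB arr n v j) 0 ≠ v := by
  induction j using skipB.induct arr n v with
  | case1 j h ih => rw [skipB, if_pos h]; exact ih
  | case2 j h => rw [skipB, if_neg h]; intro h1 h2; exact h ⟨h1, h2⟩

-- A's loop skips exactly the contiguous run of values equal to v = arr[j-1]
theorem loopA_skip (arr : List Int) (n idx : Nat) (tar : Int) (ds : List Int)
    (ans : List (List Int)) (v : Int) :
    ∀ j, idx < j → arr.getD (j - 1) 0 = v →
      loopA arr n idx j tar ds ans = loopA arr n idx (skipB arr n v j) tar ds ans := by
  intro j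
  induction j using skipB.induct arr n v with
  | case1 j h ih =>
    intro hidx hprev
    rw [skipB, if_pos h]
    have : loopA arr n idx j tar ds ans = loopA arr n idx (j + 1) tar ds ans := by
      rw [loopA]
      simp only [h.1, dif_pos]
      rw [if_pos ⟨hidx, by rw [hprev, h.2]⟩]
    rw [this]
    exact ih (by omega) (by simpa using h.2)
  | case2 j h =>
    intro _ _
    rw [skipB, if_neg h]

-- main equivalence, strong induction on a joint measure for recurA/loopA vs recurB
theorem mainAB (arr : List Int) (n : Nat) : ∀ μ : Nat,
    (∀ idx tar ds ans, 2 * (n - idx) + 2 ≤ μ →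
      recurA arr n idx tar ds ans = recurB arr n idx tar ds ans)
    ∧ (∀ idx i tar ds ans, 2 * (n - i) + 1 ≤ μ → idx ≤ i → tar ≠ 0 →
        (i = idx ∨ n ≤ i ∨ arr.getD i 0 ≠ arr.getD (i - 1) 0) →
        loopA arr n idx i tar ds ans = recurB arr n i tar ds ans) := by
  intro μ
  induction μ using Nat.strong_induction_on with
  | _ μ ih =>
  constructor
  · intro idx tar ds ans hμ
    by_cases h0 : tar = 0
    · rw [recurA, recurB, if_pos h0, if_pos h0]
    · by_cases hn : n ≤ idx
      · rw [recurA, recurB, if_neg h0, if_neg h0, if_pos hn]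
        by_cases he : idx = n
        · rw [if_pos he]
        · rw [if_neg he, loopA, dif_neg (by omega)]
      · rw [recurA, if_neg h0, if_neg (by omega : ¬ idx = n)]
        exact (ih (2 * (n - idx) + 1) (by omega)).2 idx idx tar ds ans le_rfl le_rfl h0 (Or.inl rfl)
  · intro idx i tar ds ans hμ hle htar hH
    by_cases hi : i < n
    · have hskip : ¬ (idx < i ∧ arr.getD i 0 = arr.getD (i - 1) 0) := by
        rcases hH with rfl | h | h
        · omega
        · omega
        · intro hc; exact h hc.2
      rw [loopA, dif_pos hi, if_neg hskip]
      by_cases hg : arr.getD i 0 > tar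
      · rw [if_pos hg, recurB, if_neg htar, if_neg (by omega), if_pos hg]
      · rw [if_neg hg]
        set a := arr.getD i 0 with ha
        set s := skipB arr n a (i + 1) with hs
        have hsge : i + 1 ≤ s := skipB_ge arr n a (i + 1)
        have step1 : recurA arr n (i + 1) (tar - a) (ds ++ [a]) ans
            = recurB arr n (i + 1) (tar - a) (ds ++ [a]) ans :=
          (ih (2 * (n - i)) (by omega)).1 (i + 1) (tar - a) (ds ++ [a]) ans (by omega)
        rw [step1]
        set ans1 := recurB arr n (i + 1) (tar - a) (ds ++ [a]) ans with hans1
        have step2 : loopA arr n idx (i + 1) tar ds ans1 = loopA arr n idx s tar ds ans1 :=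
          loopA_skip arr n idx tar ds ans1 a (i + 1) (by omega) (by simpa using ha.symm)
        have hHs : s = idx ∨ n ≤ s ∨ arr.getD s 0 ≠ arr.getD (s - 1) 0 := by
          by_cases hsn : s < n
          · right; right
            have h1 : arr.getD s 0 ≠ a := skipB_end arr n a (i + 1) (hs ▸ hsn)
            have h2 : arr.getD (s - 1) 0 = a := by
              rcases Nat.eq_or_lt_of_le hsge with h | h
              · simpa [← h] using ha
              · exact skipB_mem arr n a (i + 1) (s - 1) (by omega) (by omega)
            rw [h2]; exact h1
          · right; left; omega
        have step3 : loopA arr n idx s tar ds ans1 = recurB arr n s tar ds ans1 :=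
          (ih (2 * (n - s) + 1) (by omega)).2 idx s tar ds ans1 le_rfl (by omega) htar hHs
        rw [step2, step3]
        conv_rhs => rw [recurB, if_neg htar, if_neg (by omega : ¬ n ≤ i), if_neg hg]
    · rw [loopA, dif_neg hi, recurB, if_neg htar, if_pos (by omega)]

-- ===== VERDICT (by name: the statement is the Claim_ definition above) =====
theorem combinations2_spec : Claim_equal_combinations2 := by
  intro arr target _
  unfold Spec_combinations2 combinations2 combinations2_alt
  exact (mainAB arr arr.length (2 * (arr.length - 0) + 2)).1 0 target [] [] le_rfl
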